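-- pv_equiv track=rewrite | github.com/dmaynard24/hackerrank | python/algorithms/implementation/jumping_on_clouds_revisited/jumping_on_clouds_revisited.py | jumping_on_clouds_revisited
-- ===== SOURCE A (Python) =====
-- def jumping_on_clouds_revisited(c, k):
--   n = len(c)
--   e = 100
--   i = k
--   e -= 3 if c[i] == 1 else 1
--   while i != 0:
--     i = (i + k) % n
--     e -= 3 if c[i] == 1 else 1
--   return e
-- ===== SOURCE B (Python) =====
-- from math import gcd
--
-- def jumping_on_clouds_revisited(c, k):
--   n = len(c)
--   first = c[k]
--   steps = n // gcd(n, k % n)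
--   thunder = (1 if first == 1 else 0) + sum(
--     1 for j in range(2, steps + 1) if c[(j * k) % n] == 1)
--   return 100 - steps - 2 * thunder
-- ===== Notes on version B (the rewrite author's own statement) =====
-- stated objective: alternative
-- what changed: Replaces A's while-loop simulation (jump until returning to cloud 0) with a closed-form trip length steps = n // gcd(n, k % n), a direct count of thunderclouds among the visited positions (j*k) % n, and the arithmetic energy formula 100 - steps - 2*thunder.
-- intended difference: On k = -len(c) (and only there) A's raw start index makes its loop guard i != 0 fail to see that it already stands on cloud 0, so A charges cloud 0 twice and returns 100 - 2*cost(c[0]), while B returns 100 - cost(c[0]), the intended energy for a walk that starts and ends on cloud 0 (identical to k = 0). — e.g. on jumping_on_clouds_revisited([0], -1): A returns 98, B returns 99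
import Mathlib
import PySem

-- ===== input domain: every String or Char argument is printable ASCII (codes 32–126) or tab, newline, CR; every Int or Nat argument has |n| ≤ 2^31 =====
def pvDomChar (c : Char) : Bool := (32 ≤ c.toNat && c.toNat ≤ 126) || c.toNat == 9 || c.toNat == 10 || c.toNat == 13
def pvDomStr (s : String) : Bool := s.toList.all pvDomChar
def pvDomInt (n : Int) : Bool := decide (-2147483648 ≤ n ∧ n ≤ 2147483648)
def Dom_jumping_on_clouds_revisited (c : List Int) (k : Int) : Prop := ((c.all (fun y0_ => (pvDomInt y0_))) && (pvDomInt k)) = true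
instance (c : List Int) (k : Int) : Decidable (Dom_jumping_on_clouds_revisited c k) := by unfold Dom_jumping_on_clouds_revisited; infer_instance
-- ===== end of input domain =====

-- B replaces A's while-loop simulation by the closed-form trip length n // gcd(n, k % n) plus a
-- thundercloud count over the visited positions (objective: alternative decomposition, same cost).

-- ===== PORT A =====
-- energy cost of landing on index i: 3 if c[i] == 1 else 1 (index always valid inside Pre_)
def pvCostA (c : List Int) (i : Int) : Int :=
  if (PySem.List.pyGet? c i).getD 0 = 1 then 3 else 1

-- the while loop; fuel only makes the recursion structural (c.length + 1 always suffices inside Pre_)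
def pvLoopA (c : List Int) (k n : Int) : Nat → Int → Int → Int
  | 0, _, e => e
  | fuel + 1, i, e =>
    if i = 0 then e
    else
      let i' := PySem.Int.mod (i + k) n
      pvLoopA c k n fuel i' (e - pvCostA c i')

def jumping_on_clouds_revisited (c : List Int) (k : Int) : Int :=
  let n : Int := c.length
  pvLoopA c k n (c.length + 1) k (100 - pvCostA c k)

-- ===== PORT B =====
def jumping_on_clouds_revisited_alt (c : List Int) (k : Int) : Int :=
  let n : Int := c.length
  match PySem.List.pyGet? c k with      -- first = c[k]; none = IndexError, excluded by Pre_
  | none => 0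
  | some first =>
    let steps : Int := PySem.Int.floordiv n (Int.gcd n (PySem.Int.mod k n))
    let thunder : Int :=
      (if first = 1 then 1 else 0) +
        ((PySem.List.pyRange 2 (steps + 1) 1).foldl
          (fun acc j =>
            acc + (if (PySem.List.pyGet? c (PySem.Int.mod (j * k) n)).getD 0 = 1 then 1 else 0)) 0)
    100 - steps - 2 * thunder

-- ===== PRECONDITION & SPEC =====
-- Pre_ excludes exactly the inputs where A raises: empty c (IndexError) and k outside [-len(c), len(c)) (IndexError on c[k]).
def Pre_jumping_on_clouds_revisited (c : List Int) (k : Int) : Prop :=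
  c ≠ [] ∧ -(c.length : Int) ≤ k ∧ k < (c.length : Int)
instance (c : List Int) (k : Int) : Decidable (Pre_jumping_on_clouds_revisited c k) := by
  unfold Pre_jumping_on_clouds_revisited; infer_instance

def pvWitness_jumping_on_clouds_revisited : List Int × Int := ([1, 0, 0], 2)

-- On k = -len(c) (and only there) A's raw start index makes its loop guard i != 0 miss that it already
-- stands on cloud 0, so A charges cloud 0 twice and returns 100 - 2*cost(c[0]), while B returns
-- 100 - cost(c[0]), the intended energy for a walk that starts and ends on cloud 0 (same as k = 0).
def D_jumping_on_clouds_revisited (c : List Int) (k : Int) : Prop :=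
  c ≠ [] ∧ k = -(c.length : Int)
instance (c : List Int) (k : Int) : Decidable (D_jumping_on_clouds_revisited c k) := by
  unfold D_jumping_on_clouds_revisited; infer_instance

def Spec_jumping_on_clouds_revisited (c : List Int) (k : Int) (out : Int) : Prop :=
  ¬ D_jumping_on_clouds_revisited c k → out = jumping_on_clouds_revisited_alt c k
instance (c : List Int) (k : Int) (out : Int) : Decidable (Spec_jumping_on_clouds_revisited c k out) := by
  unfold Spec_jumping_on_clouds_revisited; infer_instance

def pvDiffWitness_jumping_on_clouds_revisited : List Int × Int := ([0], -1)
def pvDiffWitnessOut_jumping_on_clouds_revisited : Int × Int := (98, 99)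

-- ===== CLAIM (what is proved, stated in full; the proofs are below) =====
def Claim_unchanged_jumping_on_clouds_revisited : Prop := ∀ (c : List Int) (k : Int), Dom_jumping_on_clouds_revisited c k → Pre_jumping_on_clouds_revisited c k → Spec_jumping_on_clouds_revisited c k (jumping_on_clouds_revisited c k)
def Claim_changed_jumping_on_clouds_revisited : Prop := Dom_jumping_on_clouds_revisited (pvDiffWitness_jumping_on_clouds_revisited.1) (pvDiffWitness_jumping_on_clouds_revisited.2) ∧ Pre_jumping_on_clouds_revisited (pvDiffWitness_jumping_on_clouds_revisited.1) (pvDiffWitness_jumping_on_clouds_revisited.2) ∧ D_jumping_on_clouds_revisited (pvDiffWitness_jumping_on_clouds_revisited.1) (pvDiffWitness_jumping_on_clouds_revisited.2) ∧ jumping_on_clouds_revisited (pvDiffWitness_jumping_on_clouds_revisited.1) (pvDiffWitness_jumping_on_clouds_revisited.2) = pvDiffWitnessOut_jumping_on_clouds_revisited.1 ∧ jumping_on_clouds_revisited_alt (pvDiffWitness_jumping_on_clouds_revisited.1) (pvDiffWitness_jumping_on_clouds_revisited.2) = pvDiffWitnessOut_jumping_on_clouds_revisited.2 ∧ pvDiffWitnessOut_jumping_on_clouds_revisited.1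 ≠ pvDiffWitnessOut_jumping_on_clouds_revisited.2
def Claim_exact_jumping_on_clouds_revisited : Prop := ∀ (c : List Int) (k : Int), Dom_jumping_on_clouds_revisited c k → Pre_jumping_on_clouds_revisited c k → D_jumping_on_clouds_revisited c k → jumping_on_clouds_revisited c k ≠ jumping_on_clouds_revisited_alt c k

-- ===== LEMMAS AND PROOFS =====

-- 0/1 thundercloud indicator summed over positions (j*K) % N, (j+1)*K % N, …, (j+m-1)*K % N
def pvTh (c : List Int) (K N : Nat) : Nat → Nat → Int
  | _, 0 => 0
  | j, m + 1 =>
    (if (PySem.List.pyGet? c (((j * K % N : Nat) : Int))).getD 0 = 1 then 1 else 0)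
      + pvTh c K N (j + 1) m

-- cost = 1 + 2 * indicator
lemma pvCostA_eq (c : List Int) (i : Int) :
    pvCostA c i = 1 + 2 * (if (PySem.List.pyGet? c i).getD 0 = 1 then 1 else 0) := by
  unfold pvCostA; split_ifs <;> ring

-- index congruence: ((j:Int) * k) % N = ((j * K) % N : Nat) where K = (k % N).toNat
lemma idx_cong (k : Int) (N : Nat) (hN : 0 < N) (j : Nat) :
    ((j : Int) * k) % (N : Int) = (((j * (k % (N : Int)).toNat) % N : Nat) : Int) := by
  have hk0 : (0 : Int) ≤ k % (N : Int) := Int.emod_nonneg k (by positivity)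
  have hkc : ((k % (N : Int)).toNat : Int) = k % (N : Int) := Int.toNat_of_nonneg hk0
  have hlt : k % (N : Int) < (N : Int) := Int.emod_lt_of_pos k (by exact_mod_cast hN)
  have : (((j * (k % (N : Int)).toNat) % N : Nat) : Int)
      = ((j : Int) * ((k % (N : Int)).toNat : Int)) % (N : Int) := by push_cast; ring_nf
  rw [this, hkc, Int.mul_emod j k, Int.mul_emod j (k % (N : Int)),
    Int.emod_emod_of_dvd _ dvd_rfl]

-- step congruence: adding k to position (j*K)%N lands on ((j+1)*K)%N
lemma step_cong (k : Int) (N : Nat) (hN : 0 < N) (j : Nat) :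
    ((((j * (k % (N : Int)).toNat) % N : Nat) : Int) + k) % (N : Int)
      = ((((j + 1) * (k % (N : Int)).toNat) % N : Nat) : Int) := by
  have h1 : (((j * (k % (N : Int)).toNat) % N : Nat) : Int)
      = ((j : Int) * k) % (N : Int) := (idx_cong k N hN j).symm
  have h2 : (((j + 1) : Int) * k) % (N : Int)
      = ((((j + 1) * (k % (N : Int)).toNat) % N : Nat) : Int) := by
    have := idx_cong k N hN (j + 1); push_cast at this ⊢; omega
  rw [h1, Int.emod_add_emod, ← h2]; ring_nf

-- divisibility characterisation of the return to cloud 0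
lemma dvd_char_aux (g n' k' j : Nat) (hgpos : 0 < g) (hcop : Nat.Coprime n' k') :
    g * n' ∣ j * (g * k') ↔ n' ∣ j := by
  constructor
  · rintro ⟨t, ht⟩
    have h : g * (j * k') = g * (n' * t) := by
      calc g * (j * k') = j * (g * k') := by ring
        _ = g * n' * t := ht
        _ = g * (n' * t) := by ring
    exact hcop.dvd_of_dvd_mul_right ⟨t, Nat.eq_of_mul_eq_mul_left hgpos h⟩
  · rintro ⟨t, rfl⟩
    exact ⟨t * k', by ring⟩

lemma dvd_char (N K : Nat) (hN : 0 < N) (j : Nat) :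
    N ∣ j * K ↔ (N / Nat.gcd N K) ∣ j := by
  have hgpos : 0 < Nat.gcd N K := Nat.gcd_pos_of_pos_left K hN
  have hn' : N = Nat.gcd N K * (N / Nat.gcd N K) := (Nat.mul_div_cancel' (Nat.gcd_dvd_left N K)).symm
  have hk' : K = Nat.gcd N K * (K / Nat.gcd N K) := (Nat.mul_div_cancel' (Nat.gcd_dvd_right N K)).symm
  have h := dvd_char_aux (Nat.gcd N K) (N / Nat.gcd N K) (K / Nat.gcd N K) j hgpos
    (Nat.coprime_div_gcd_div_gcd (m := N) (n := K) hgpos)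
  rw [← hn', ← hk'] at h
  exact h

-- the while loop, seen from position (j*K)%N with m = J - j steps left to go, subtracts
-- exactly the costs of positions (j+1)*K%N, ..., J*K%N
lemma loop_eq (c : List Int) (k : Int) (N : Nat) (hN : 0 < N) :
    ∀ (m j : Nat) (fuel : Nat) (e : Int), 0 < j →
      j + m = N / Nat.gcd N (k % (N : Int)).toNat → m ≤ fuel →
      pvLoopA c k (N : Int) fuel (((j * (k % (N : Int)).toNat) % N : Nat) : Int) e
        = e - ((m : Int) + 2 * pvTh c (k % (N : Int)).toNat N (j + 1) m) := by
  intro m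
  induction m with
  | zero =>
    intro j fuel e hj hJ _
    have hdvd : N ∣ j * (k % (N : Int)).toNat :=
      (dvd_char N _ hN j).mpr ⟨1, by omega⟩
    have hz : (j * (k % (N : Int)).toNat) % N = 0 := Nat.mod_eq_zero_of_dvd hdvd
    cases fuel with
    | zero => simp [pvLoopA, pvTh]
    | succ f => simp [pvLoopA, pvTh, hz]
  | succ m ih =>
    intro j fuel e hj hJ hfuel
    have hndvd : ¬ N ∣ j * (k % (N : Int)).toNat := by
      rw [dvd_char N _ hN j]
      intro hdvd
      have := Nat.le_of_dvd hj hdvd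
      omega
    have hmod : (j * (k % (N : Int)).toNat) % N ≠ 0 := by
      intro h
      exact hndvd (Nat.dvd_of_mod_eq_zero h)
    obtain ⟨f, rfl⟩ : ∃ f, fuel = f + 1 := ⟨fuel - 1, by omega⟩
    rw [pvLoopA]
    have hi0 : ¬ ((((j * (k % (N : Int)).toNat) % N : Nat) : Int) = 0) := by
      exact_mod_cast hmod
    rw [if_neg hi0]
    have hmodN : PySem.Int.mod ((((j * (k % (N : Int)).toNat) % N : Nat) : Int) + k) (N : Int)
        = ((((j + 1) * (k % (N : Int)).toNat) % N : Nat) : Int) := by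
      rw [PySem.Int.mod_eq_emod_of_pos (by exact_mod_cast hN), step_cong k N hN j]
    rw [hmodN, ih (j + 1) f _ (by omega) (by omega) (by omega), pvCostA_eq]
    have hTh : pvTh c (k % (N : Int)).toNat N (j + 1) (m + 1)
        = (if (PySem.List.pyGet? c ((((j + 1) * (k % (N : Int)).toNat) % N : Nat) : Int)).getD 0 = 1 then 1 else 0)
          + pvTh c (k % (N : Int)).toNat N (j + 2) m := by
      rw [pvTh]
    rw [hTh]
    push_cast
    ring

-- B's thundercloud fold over range(j, j+m) equals pvTh
lemma fold_eq (c : List Int) (k : Int) (N : Nat) (hN : 0 < N) :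
    ∀ (m j : Nat) (acc : Int), 0 < j →
      (PySem.List.pyRange ((j : Nat) : Int) (((j + m : Nat) : Nat) : Int) 1).foldl
        (fun acc t => acc + (if (PySem.List.pyGet? c (PySem.Int.mod (t * k) ((N : Nat) : Int))).getD 0 = 1 then 1 else 0)) acc
      = acc + pvTh c (k % (N : Int)).toNat N j m := by
  intro m
  induction m with
  | zero =>
    intro j acc _
    rw [Nat.add_zero, PySem.List.pyRange_one_eq_nil (le_refl _)]
    simp [pvTh]
  | succ m ih =>
    intro j acc hj
    have hlt : ((j : Nat) : Int) < (((j + (m + 1) : Nat) : Nat) : Int) := by push_cast; omega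
    rw [PySem.List.pyRange_one_cons hlt]
    simp only [List.foldl_cons]
    have hidx : PySem.Int.mod (((j : Nat) : Int) * k) ((N : Nat) : Int)
        = (((j * (k % (N : Int)).toNat) % N : Nat) : Int) := by
      rw [PySem.Int.mod_eq_emod_of_pos (by exact_mod_cast hN), idx_cong k N hN j]
    rw [hidx]
    have hcast : (((j : Nat) : Int) + 1) = (((j + 1 : Nat) : Nat) : Int) := by push_cast; ring
    have hend : (((j + (m + 1) : Nat) : Nat) : Int) = ((((j + 1) + m : Nat) : Nat) : Int) := by
      push_cast; ring
    rw [hcast, hend, ih (j + 1) _ (by omega)]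
    rw [pvTh]
    ring

-- A = B outside D_, main computation
lemma main_eq (c : List Int) (k : Int) (h1 : c ≠ [])
    (h2 : -(c.length : Int) ≤ k) (h3 : k < (c.length : Int)) (h4 : k ≠ -(c.length : Int)) :
    jumping_on_clouds_revisited c k = jumping_on_clouds_revisited_alt c k := by
  have hN : 0 < c.length := List.length_pos_of_ne_nil h1
  have hNi : (0 : Int) < (c.length : Int) := by exact_mod_cast hN
  obtain ⟨v, hv⟩ : ∃ v, PySem.List.pyGet? c k = some v := by
    cases h : PySem.List.pyGet? c k with
    | some v => exact ⟨v, rfl⟩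
    | none =>
      rw [PySem.List.pyGet?_eq_none_iff] at h
      exact absurd (by simp [PySem.Raise.InRange]; omega) h
  have hA0 : jumping_on_clouds_revisited c k
      = pvLoopA c k (c.length : Int) (c.length + 1) k (100 - pvCostA c k) := rfl
  by_cases hk0 : k = 0
  · -- k = 0: the loop exits immediately; B: steps = 1, empty range
    subst hk0
    have hA : jumping_on_clouds_revisited c 0 = 100 - pvCostA c 0 := by
      rw [hA0, pvLoopA, if_pos rfl]
    have hmod : PySem.Int.mod 0 (c.length : Int) = 0 := by
      rw [PySem.Int.mod_eq_emod_of_pos hNi, Int.zero_emod]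
    have hgcd : Int.gcd (c.length : Int) 0 = c.length := by simp [Int.gcd]
    have hdiv : PySem.Int.floordiv (c.length : Int) ((c.length : Nat) : Int) = 1 := by
      have := PySem.Int.floordiv_natCast c.length c.length
      rw [this, Nat.div_self hN]
      rfl
    have hrange : PySem.List.pyRange 2 (1 + 1) 1 = [] :=
      PySem.List.pyRange_one_eq_nil (by norm_num)
    have hB : jumping_on_clouds_revisited_alt c 0
        = 100 - 1 - 2 * ((if v = 1 then 1 else 0) + 0) := by
      simp only [jumping_on_clouds_revisited_alt, hv, hmod, hgcd, hdiv, hrange, List.foldl_nil]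
    rw [hA, hB, pvCostA_eq, hv]
    simp only [Option.getD_some]
    split_ifs <;> ring
  · -- k ≠ 0
    have hkrange : -(c.length : Int) < k := lt_of_le_of_ne h2 (Ne.symm h4)
    have hKnn : (0 : Int) ≤ k % (c.length : Int) := Int.emod_nonneg k (ne_of_gt hNi)
    have hKlt : k % (c.length : Int) < (c.length : Int) := Int.emod_lt_of_pos k hNi
    have hKcast : (((k % (c.length : Int)).toNat : Nat) : Int) = k % (c.length : Int) :=
      Int.toNat_of_nonneg hKnn
    have hKne : (k % (c.length : Int)).toNat ≠ 0 := by
      intro h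
      have h0 : k % (c.length : Int) = 0 := by rw [← hKcast, h]; rfl
      obtain ⟨t, rfl⟩ := Int.dvd_of_emod_eq_zero h0
      rcases lt_trichotomy t 0 with ht | ht | ht
      · nlinarith
      · exact hk0 (by rw [ht, mul_zero])
      · nlinarith
    have hKltN : (k % (c.length : Int)).toNat < c.length := by omega
    have hg : 0 < Nat.gcd c.length (k % (c.length : Int)).toNat :=
      Nat.gcd_pos_of_pos_left _ hN
    have hgle : Nat.gcd c.length (k % (c.length : Int)).toNat ≤ (k % (c.length : Int)).toNat :=
      Nat.le_of_dvd (Nat.pos_of_ne_zero hKne) (Nat.gcd_dvd_right _ _)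
    have hJ2 : 2 ≤ c.length / Nat.gcd c.length (k % (c.length : Int)).toNat := by
      rw [Nat.le_div_iff_mul_le hg]
      obtain ⟨t, ht⟩ := Nat.gcd_dvd_left c.length (k % (c.length : Int)).toNat
      rcases t with _ | t
      · omega
      · rcases t with _ | t
        · omega
        · nlinarith
    have hJN : c.length / Nat.gcd c.length (k % (c.length : Int)).toNat ≤ c.length :=
      Nat.div_le_self _ _
    -- A side: one manual loop step, then loop_eq at j = 2
    have hi2 : PySem.Int.mod (k + k) ((c.length : Nat) : Int)
        = (((2 * (k % (c.length : Int)).toNat) % c.length : Nat) : Int) := by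
      rw [PySem.Int.mod_eq_emod_of_pos hNi, show k + k = ((2 : Nat) : Int) * k from by push_cast; ring]
      exact idx_cong k c.length hN 2
    have hA : jumping_on_clouds_revisited c k
        = 100 - pvCostA c k
          - pvCostA c (((2 * (k % (c.length : Int)).toNat) % c.length : Nat) : Int)
          - (((c.length / Nat.gcd c.length (k % (c.length : Int)).toNat - 2 : Nat) : Int)
             + 2 * pvTh c (k % (c.length : Int)).toNat c.length (2 + 1)
                 (c.length / Nat.gcd c.length (k % (c.length : Int)).toNat - 2)) := by
      rw [hA0, pvLoopA, if_neg hk0]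
      simp only []
      rw [hi2, loop_eq c k c.length hN
        (c.length / Nat.gcd c.length (k % (c.length : Int)).toNat - 2) 2 c.length _
        (by omega) (by omega) (by omega)]
    -- B side
    have hgcd : Int.gcd ((c.length : Nat) : Int) (PySem.Int.mod k ((c.length : Nat) : Int))
        = Nat.gcd c.length (k % (c.length : Int)).toNat := by
      rw [PySem.Int.mod_eq_emod_of_pos hNi]
      simp only [Int.gcd, Int.natAbs_natCast]
      congr 1
      omega
    have hsteps : PySem.Int.floordiv ((c.length : Nat) : Int)
        ((Int.gcd ((c.length : Nat) : Int) (PySem.Int.mod k ((c.length : Nat) : Int)) : Nat) : Int)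
        = ((c.length / Nat.gcd c.length (k % (c.length : Int)).toNat : Nat) : Int) := by
      rw [hgcd]
      exact PySem.Int.floordiv_natCast c.length _
    have hf := fold_eq c k c.length hN
      (c.length / Nat.gcd c.length (k % (c.length : Int)).toNat - 1) 2 0 (by omega)
    rw [show ((2 + (c.length / Nat.gcd c.length (k % (c.length : Int)).toNat - 1) : Nat) : Int)
        = ((c.length / Nat.gcd c.length (k % (c.length : Int)).toNat : Nat) : Int) + 1 from by omega,
      show (((2 : Nat) : Nat) : Int) = (2 : Int) from by norm_num] at hf
    have hB : jumping_on_clouds_revisited_alt c k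
        = 100 - ((c.length / Nat.gcd c.length (k % (c.length : Int)).toNat : Nat) : Int)
          - 2 * ((if v = 1 then 1 else 0)
              + (0 + pvTh c (k % (c.length : Int)).toNat c.length 2
                  (c.length / Nat.gcd c.length (k % (c.length : Int)).toNat - 1))) := by
      simp only [jumping_on_clouds_revisited_alt, hv, hsteps, hf]
    rw [hA, hB, pvCostA_eq, pvCostA_eq, hv]
    rw [show c.length / Nat.gcd c.length (k % (c.length : Int)).toNat - 1
        = (c.length / Nat.gcd c.length (k % (c.length : Int)).toNat - 2) + 1 from by omega]
    rw [pvTh]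
    simp only [Option.getD_some]
    have hc2 : ((c.length / Nat.gcd c.length (k % (c.length : Int)).toNat - 2 : Nat) : Int)
        = ((c.length / Nat.gcd c.length (k % (c.length : Int)).toNat : Nat) : Int) - 2 := by omega
    rw [hc2]
    ring

-- ===== VERDICT (by name: the statement is the Claim_ definition above) =====
theorem jumping_on_clouds_revisited_spec : Claim_unchanged_jumping_on_clouds_revisited := by
  intro c k _ hPre hnD
  obtain ⟨h1, h2, h3⟩ := hPre
  have h4 : k ≠ -(c.length : Int) := fun h => hnD ⟨h1, h⟩
  exact main_eq c k h1 h2 h3 h4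

theorem jumping_on_clouds_revisited_changed : Claim_changed_jumping_on_clouds_revisited := by
  unfold Claim_changed_jumping_on_clouds_revisited; decide

-- the loop returns immediately on cloud 0, whatever fuel is left
lemma loop_zero (c : List Int) (k n : Int) (fuel : Nat) (e : Int) :
    pvLoopA c k n fuel 0 e = e := by
  cases fuel with
  | zero => rfl
  | succ f => rw [pvLoopA, if_pos rfl]

theorem jumping_on_clouds_revisited_tight : Claim_exact_jumping_on_clouds_revisited := by
  intro c k _ hPre hD
  obtain ⟨h1, hk⟩ := hD
  subst hk
  obtain ⟨a, t, rfl⟩ : ∃ a t, c = a :: t := by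
    cases c with
    | nil => exact absurd rfl h1
    | cons a t => exact ⟨a, t, rfl⟩
  have hN : 0 < (a :: t).length := by simp
  have hNi : (0 : Int) < (((a :: t).length : Nat) : Int) := by exact_mod_cast hN
  have hvk : PySem.List.pyGet? (a :: t) (-(((a :: t).length : Nat) : Int)) = some a := by
    rw [PySem.List.pyGet?_neg_natCast (a :: t) (a :: t).length hN (le_refl _), Nat.sub_self]
    rfl
  have hA : jumping_on_clouds_revisited (a :: t) (-(((a :: t).length : Nat) : Int))
      = 100 - (if a = 1 then (3 : Int) else 1) - (if a = 1 then (3 : Int) else 1) := by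
    have h0 : jumping_on_clouds_revisited (a :: t) (-(((a :: t).length : Nat) : Int))
        = pvLoopA (a :: t) (-(((a :: t).length : Nat) : Int)) (((a :: t).length : Nat) : Int)
            ((a :: t).length + 1) (-(((a :: t).length : Nat) : Int))
            (100 - pvCostA (a :: t) (-(((a :: t).length : Nat) : Int))) := rfl
    have hne : ¬ (-(((a :: t).length : Nat) : Int) = 0) := by
      intro h
      omega
    have him : PySem.Int.mod (-(((a :: t).length : Nat) : Int) + -(((a :: t).length : Nat) : Int))
        (((a :: t).length : Nat) : Int) = 0 := by
      rw [PySem.Int.mod_eq_emod_of_pos hNi,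
        show -(((a :: t).length : Nat) : Int) + -(((a :: t).length : Nat) : Int)
          = (-2) * (((a :: t).length : Nat) : Int) from by ring, Int.mul_emod_left]
    rw [h0, pvLoopA, if_neg hne]
    simp only []
    rw [him, loop_zero]
    simp only [pvCostA, hvk, PySem.List.pyGet?_zero_cons, Option.getD_some]
  have hmod0 : PySem.Int.mod (-(((a :: t).length : Nat) : Int)) (((a :: t).length : Nat) : Int) = 0 := by
    rw [PySem.Int.mod_eq_emod_of_pos hNi,
      show -(((a :: t).length : Nat) : Int) = (-1) * (((a :: t).length : Nat) : Int) from by ring,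
      Int.mul_emod_left]
  have hgcd0 : Int.gcd (((a :: t).length : Nat) : Int) 0 = (a :: t).length := by
    simp [Int.gcd]
    omega
  have hdiv : PySem.Int.floordiv (((a :: t).length : Nat) : Int) (((a :: t).length : Nat) : Int)
      = 1 := by
    rw [PySem.Int.floordiv_natCast, Nat.div_self hN]
    rfl
  have hrange : PySem.List.pyRange 2 (1 + 1) 1 = [] :=
    PySem.List.pyRange_one_eq_nil (by norm_num)
  have hB : jumping_on_clouds_revisited_alt (a :: t) (-(((a :: t).length : Nat) : Int))
      = 100 - 1 - 2 * ((if a = 1 then (1 : Int) else 0) + 0) := by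
    simp only [jumping_on_clouds_revisited_alt, hvk, hmod0, hgcd0, hdiv, hrange, List.foldl_nil]
  rw [hA, hB]
  split_ifs <;> norm_num
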